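-- pv_equiv track=rewrite | github.com/jebt/teletekst-nieuws | teletekst_nieuws.py | transform_to_normal_format
-- ===== SOURCE A (Python) =====
-- def transform_to_normal_format(tt_format_text: str) -> str:
--     def is_closing_quote(char, index, text):
--         assert char == text[index] and char in ["'", '"']
--         text_so_far = text[:index]
--         if text_so_far.count(char) % 2 == 1:
--             return True
--         return False
--
--     lines = tt_format_text.split("\n")
--     for i, line in enumerate(lines):
--         if line.strip() == "":
--             lines[i] = "\n\n"
--         else:
--             lines[i] = line.strip() + " "
--     compact_text = "".join(lines)
--     new_text = compact_text
--     correction_counter = 0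
--     for i, character in enumerate(compact_text):
--         numbers = "0123456789"
--         if i == 0:
--             continue
--         # ignore . in "..."
--         if character == "." and compact_text[i + 1] == ".":
--             continue
--         # ignore . in big numbers
--         if character == "." and (compact_text[i - 1] in numbers and
--                                  compact_text[i + 1] in numbers and  # these do not go out of bounds because there is
--                                  compact_text[i + 2] in numbers and  # an added space at the end and the rest does not
--                                  compact_text[i + 3] in numbers):    # get evaluated
--             continue
--         # ignore , in decimal numbers
--         elif character == "," and (compact_text[i - 1] in numbers and
--                                    compact_text[i + 1] in numbers):
--             continue
--         # ignore . and ! and ? when followed by closing ' or "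
--         elif character in ".!?" and (compact_text[i + 1] in "'\"" and
--                                      is_closing_quote(compact_text[i + 1], i + 1, compact_text)):
--             continue
--         elif character in ".,!?;:" and compact_text[i + 1].strip() != "":
--             correction_counter += 1
--             new_text = new_text[:i + correction_counter] + " " + compact_text[i + 1:]
--
--     # remove the spaces at the end of the lines
--     new_lines = new_text.splitlines()
--     for i, line in enumerate(new_lines):
--         if len(line) > 0 and line[-1] == " ":
--             new_lines[i] = line.strip()
--     new_text = "\n".join(new_lines)
--     new_text = new_text.strip()
--     return new_text
-- ===== SOURCE B (Python) =====
-- def transform_to_normal_format(tt_format_text: str) -> str: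
--     # Single pass with an output buffer and incremental quote-parity instead of slice-and-rebuild.
--     compact = "".join(
--         "\n\n" if line.strip() == "" else line.strip() + " "
--         for line in tt_format_text.split("\n")
--     )
--     digits = "0123456789"
--     out = []
--     sq_odd = dq_odd = False  # parity of ' and " seen so far (quotes strictly before the current index)
--     for i, c in enumerate(compact):
--         out.append(c)
--         if c == "'":
--             sq_odd = not sq_odd
--         elif c == '"':
--             dq_odd = not dq_odd
--         if i == 0:
--             continue
--         if c == "." and compact[i + 1] == ".":
--             continue
--         if c == "." and (compact[i - 1] in digits and compact[i + 1] in digits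
--                          and compact[i + 2] in digits and compact[i + 3] in digits):
--             continue
--         if c == "," and compact[i - 1] in digits and compact[i + 1] in digits:
--             continue
--         if c in ".!?" and compact[i + 1] == "'" and sq_odd:
--             continue
--         if c in ".!?" and compact[i + 1] == '"' and dq_odd:
--             continue
--         if c in ".,!?;:" and compact[i + 1].strip() != "":
--             out.append(" ")
--     new_text = "".join(out)
--     lines = [line.strip() if line.endswith(" ") else line for line in new_text.splitlines()]
--     return "\n".join(lines).strip()
-- ===== Notes on version B (the rewrite author's own statement) =====
-- stated objective: alternative
-- what changed: Replaced A's insertion loop, which rebuilds the whole string by slicing and rescans the prefix to count quotes at every punctuation mark, by a single left-to-right pass that appends characters (plus inserted spaces) to an output buffer while tracking the parity of each quote character incrementally.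
import Mathlib
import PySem

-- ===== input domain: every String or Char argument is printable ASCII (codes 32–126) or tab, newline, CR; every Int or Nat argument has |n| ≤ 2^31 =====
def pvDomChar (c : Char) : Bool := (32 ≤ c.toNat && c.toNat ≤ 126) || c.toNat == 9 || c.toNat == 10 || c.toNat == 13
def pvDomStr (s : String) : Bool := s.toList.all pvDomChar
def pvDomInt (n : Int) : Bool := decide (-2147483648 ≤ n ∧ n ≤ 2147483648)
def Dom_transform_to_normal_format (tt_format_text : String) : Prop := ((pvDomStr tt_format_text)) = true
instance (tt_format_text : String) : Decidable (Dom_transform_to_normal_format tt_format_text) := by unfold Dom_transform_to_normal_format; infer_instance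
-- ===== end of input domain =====

-- B replaces A's insertion loop, which rebuilds the string by slicing and recounts quotes over
-- the prefix at each punctuation mark, by a single pass appending to an output buffer while
-- tracking quote parity incrementally (alternative structure; not measured faster).


-- Helpers shared by BOTH ports: phase 1 (strip lines, join with trailing spaces) and the
-- indexing idioms both Python sources write identically (compact[j] == c, compact[j] in cs,
-- compact[j].strip() != "").  pyGet? = none (Python IndexError) yields false: in both sources
-- these reads are short-circuit-guarded in range.
def pvNumbers : List Char := "0123456789".toList

def pvCompact (t : List Char) : List Char :=
  PySem.Chars.join []
    ((PySem.Chars.splitOn t "\n".toList).map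
      (fun line => if PySem.Chars.strip line == [] then "\n\n".toList
                   else PySem.Chars.strip line ++ [' ']))

def pvCharEq (text : List Char) (j : Int) (c : Char) : Bool :=
  PySem.List.pyGet? text j == some c

def pvCharIn (text : List Char) (j : Int) (cs : List Char) : Bool :=
  match PySem.List.pyGet? text j with
  | some ch => cs.contains ch
  | none => false

def pvNextNonspace (text : List Char) (j : Int) : Bool :=
  match PySem.List.pyGet? text j with
  | some ch => !(PySem.Chars.strip [ch]).isEmpty
  | none => false

-- ===== PORT A =====
-- is_closing_quote(char, index, text): parity of `char` in text[:index] (the assert always holds).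
def pvAIsClosingQuote (ch : Char) (index : Int) (text : List Char) : Bool :=
  (PySem.List.slice text none (some index)).count ch % 2 == 1

-- one iteration of A's insertion loop over enumerate(compact); state = (new_text, correction_counter)
def pvAStep (compact : List Char) (st : List Char × Int) (p : Int × Char) : List Char × Int :=
  let i := p.1
  let c := p.2
  if i == 0 then st
  else if c == '.' && pvCharEq compact (i+1) '.' then st
  else if c == '.' && (pvCharIn compact (i-1) pvNumbers && pvCharIn compact (i+1) pvNumbers &&
                       pvCharIn compact (i+2) pvNumbers && pvCharIn compact (i+3) pvNumbers) then st
  else if c == ',' && (pvCharIn compact (i-1) pvNumbers && pvCharIn compact (i+1) pvNumbers) then st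
  else if ".!?".toList.contains c &&
          (match PySem.List.pyGet? compact (i+1) with
           | some q => "'\"".toList.contains q && pvAIsClosingQuote q (i+1) compact
           | none => false) then st
  else if ".,!?;:".toList.contains c && pvNextNonspace compact (i+1) then
    let cc := st.2 + 1
    (PySem.List.slice st.1 none (some (i + cc)) ++ [' '] ++
       PySem.List.slice compact (some (i+1)) none, cc)
  else st

def pvAPhase3Line (line : List Char) : List Char :=
  if decide (0 < line.length) && (PySem.List.pyGet? line (-1) == some ' ')
  then PySem.Chars.strip line else line

def transform_to_normal_format (tt_format_text : String) : String :=
  let compact := pvCompact tt_format_text.toList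
  let res := (PySem.List.enumerate compact).foldl (pvAStep compact) (compact, 0)
  String.ofList (PySem.Chars.strip
    (PySem.Chars.join ['\n'] ((PySem.Chars.splitlines res.1).map pvAPhase3Line)))

-- ===== PORT B =====
-- one iteration of B's single pass; state = (out buffer, parity of ', parity of ")
def pvBStep (compact : List Char) (st : List Char × Bool × Bool) (p : Int × Char) : List Char × Bool × Bool :=
  let i := p.1
  let c := p.2
  let out := st.1 ++ [c]
  let sq := if c == '\'' then !st.2.1 else st.2.1
  let dq := if c == '\'' then st.2.2 else if c == '"' then !st.2.2 else st.2.2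
  if i == 0 then (out, sq, dq)
  else if c == '.' && pvCharEq compact (i+1) '.' then (out, sq, dq)
  else if c == '.' && (pvCharIn compact (i-1) pvNumbers && pvCharIn compact (i+1) pvNumbers &&
                       pvCharIn compact (i+2) pvNumbers && pvCharIn compact (i+3) pvNumbers) then (out, sq, dq)
  else if c == ',' && (pvCharIn compact (i-1) pvNumbers && pvCharIn compact (i+1) pvNumbers) then (out, sq, dq)
  else if ".!?".toList.contains c && pvCharEq compact (i+1) '\'' && sq then (out, sq, dq)
  else if ".!?".toList.contains c && pvCharEq compact (i+1) '"' && dq then (out, sq, dq)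
  else if ".,!?;:".toList.contains c && pvNextNonspace compact (i+1) then (out ++ [' '], sq, dq)
  else (out, sq, dq)

def pvBPhase3Line (line : List Char) : List Char :=
  if PySem.Chars.endswith line [' '] then PySem.Chars.strip line else line

def transform_to_normal_format_alt (tt_format_text : String) : String :=
  let compact := pvCompact tt_format_text.toList
  let res := (PySem.List.enumerate compact).foldl (pvBStep compact) ([], false, false)
  String.ofList (PySem.Chars.strip
    (PySem.Chars.join ['\n'] ((PySem.Chars.splitlines res.1).map pvBPhase3Line)))

-- ===== PRECONDITION & SPEC =====
def Spec_transform_to_normal_format (tt_format_text : String) (out : String) : Prop := out = transform_to_normal_format_alt tt_format_text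
instance (tt_format_text : String) (out : String) : Decidable (Spec_transform_to_normal_format tt_format_text out) := by unfold Spec_transform_to_normal_format; infer_instance

-- ===== CLAIM (what is proved, stated in full; the proofs are below) =====
def Claim_equal_transform_to_normal_format : Prop := ∀ (tt_format_text : String), Dom_transform_to_normal_format tt_format_text → Spec_transform_to_normal_format tt_format_text (transform_to_normal_format tt_format_text)

-- ===== LEMMAS AND PROOFS =====

-- quote parity of the prefix of length s
def pvParity (compact : List Char) (q : Char) (s : Nat) : Bool :=
  (compact.take s).count q % 2 == 1

theorem pvParity_succ (compact : List Char) (q c : Char) (s : Nat)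
    (hc : compact.drop s = c :: compact.drop (s+1)) :
    pvParity compact q (s+1) = if c == q then !pvParity compact q s else pvParity compact q s := by
  have hs : compact[s]? = some c := by
    rw [← List.head?_drop, hc]; rfl
  unfold pvParity
  rw [List.take_add_one, hs]
  rcases Nat.mod_two_eq_zero_or_one ((compact.take s).count q) with h2 | h2 <;>
    by_cases h : c = q <;>
    simp [h, h2, List.count_append, Nat.add_mod]

theorem pvStep_rel (compact : List Char) (s : Nat) (out : List Char) (c : Char)
    (hc : compact.drop s = c :: compact.drop (s+1)) :
    ∃ out',
      pvAStep compact (out ++ compact.drop s, (out.length : Int) - s) ((s : Int), c)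
        = (out' ++ compact.drop (s+1), (out'.length : Int) - (s+1))
      ∧ pvBStep compact (out, pvParity compact '\'' s, pvParity compact '"' s) ((s : Int), c)
        = (out', pvParity compact '\'' (s+1), pvParity compact '"' (s+1)) := by
  have hcast : (s : Int) + 1 = ((s+1 : Nat) : Int) := by push_cast; ring
  -- the updated parities B computes are the prefix parities one step further
  have hsq : (if c == '\'' then !pvParity compact '\'' s else pvParity compact '\'' s)
      = pvParity compact '\'' (s+1) := (pvParity_succ compact '\'' c s hc).symm
  have hdq : (if c == '\'' then pvParity compact '"' s
              else if c == '"' then !pvParity compact '"' s else pvParity compact '"' s)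
      = pvParity compact '"' (s+1) := by
    rw [pvParity_succ compact '"' c s hc]
    by_cases h : c = '\''
    · subst h; simp
    · simp [h]
  -- the skip-branch invariant step
  have hskip : (out ++ compact.drop s, (out.length : Int) - s)
      = ((out ++ [c]) ++ compact.drop (s+1), (((out ++ [c]).length : Nat) : Int) - ((s+1 : Nat) : Int)) := by
    rw [hc]; simp
  -- A's quote condition equals the disjunction of B's two quote branches
  have hq : (match PySem.List.pyGet? compact ((s : Int)+1) with
           | some q => "'\"".toList.contains q && pvAIsClosingQuote q ((s : Int)+1) compact
           | none => false)
      = ((pvCharEq compact ((s : Int)+1) '\'' && pvParity compact '\'' (s+1)) ||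
         (pvCharEq compact ((s : Int)+1) '"' && pvParity compact '"' (s+1))) := by
    unfold pvCharEq pvAIsClosingQuote
    rw [hcast, PySem.List.slice_to_natCast]
    cases hg : PySem.List.pyGet? compact ((s+1 : Nat) : Int) with
    | none => simp
    | some q =>
      by_cases h1 : q = '\''
      · subst h1; simp [pvParity]
      · by_cases h2 : q = '"'
        · subst h2; simp [pvParity]
        · simp [h1, h2]
  have hif : ∀ (x y : Bool) (r z : List Char × Bool × Bool),
      (if x then r else if y then r else z) = (if (x || y) then r else z) := by
    intro x y r z; cases x <;> simp
  have harg : (s:Int) + ((out.length : Int) - (s:Int) + 1) = ((out.length + 1 : Nat) : Int) := by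
    push_cast; ring
  have htake : (out ++ compact.drop s).take (out.length + 1) = out ++ [c] := by
    rw [hc]; simp [List.take_append]
  unfold pvAStep pvBStep
  dsimp only
  rw [hsq, hdq]
  rw [hif (".!?".toList.contains c && pvCharEq compact ((s : Int)+1) '\'' && pvParity compact '\'' (s+1))
        (".!?".toList.contains c && pvCharEq compact ((s : Int)+1) '\"' && pvParity compact '\"' (s+1))
        (out ++ [c], pvParity compact '\'' (s+1), pvParity compact '\"' (s+1))
        (if (".,!?;:".toList.contains c && pvNextNonspace compact ((s : Int)+1)) = true then
          (out ++ [c] ++ [' '], pvParity compact '\'' (s+1), pvParity compact '\"' (s+1))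
         else (out ++ [c], pvParity compact '\'' (s+1), pvParity compact '\"' (s+1)))]
  have hq2 : (".!?".toList.contains c &&
          (match PySem.List.pyGet? compact ((s : Int)+1) with
           | some q => "'\"".toList.contains q && pvAIsClosingQuote q ((s : Int)+1) compact
           | none => false))
      = ((".!?".toList.contains c && pvCharEq compact ((s : Int)+1) '\'' && pvParity compact '\'' (s+1)) ||
         (".!?".toList.contains c && pvCharEq compact ((s : Int)+1) '\"' && pvParity compact '\"' (s+1))) := by
    rw [hq]
    cases ".!?".toList.contains c <;>
      cases pvCharEq compact ((s : Int)+1) '\'' <;>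
        cases pvCharEq compact ((s : Int)+1) '\"' <;> simp
  rw [hq2]
  split_ifs <;>
    first
    | exact ⟨out ++ [c], by rw [hskip]; norm_cast, by simp⟩
    | · refine ⟨out ++ [c] ++ [' '], ?_, by simp⟩
        dsimp only
        rw [harg, PySem.List.slice_to_natCast, hcast, PySem.List.slice_from_natCast, htake]
        simp [Prod.ext_iff]
        ring

theorem pvLoop_eq (compact : List Char) :
    ∀ (l : List Char) (s : Nat) (out : List Char), l = compact.drop s →
    ((PySem.List.enumerate l (s : Int)).foldl (pvAStep compact)
        (out ++ l, (out.length : Int) - s)).1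
      = ((PySem.List.enumerate l (s : Int)).foldl (pvBStep compact)
          (out, pvParity compact '\'' s, pvParity compact '"' s)).1 := by
  intro l
  induction l with
  | nil => intro s out _; simp [PySem.List.enumerate]
  | cons c l' ih =>
    intro s out hl
    have hl' : l' = compact.drop (s+1) := by
      have := congrArg (List.drop 1) hl
      simpa [List.drop_drop, Nat.add_comm] using this
    have hc : compact.drop s = c :: compact.drop (s+1) := by rw [← hl, ← hl']
    obtain ⟨out', hA, hB⟩ := pvStep_rel compact s out c hc
    have hcast : (s : Int) + 1 = ((s+1 : Nat) : Int) := by push_cast; ring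
    rw [PySem.List.enumerate_cons, List.foldl_cons, List.foldl_cons, hl, hcast]
    rw [hcast] at hA
    rw [hA, hB, ← hl']
    exact ih (s+1) out' hl'

theorem pvPhase3_eq (line : List Char) : pvAPhase3Line line = pvBPhase3Line line := by
  unfold pvAPhase3Line pvBPhase3Line
  rcases List.eq_nil_or_concat line with h | ⟨l', x, h⟩
  · subst h; simp [PySem.Chars.endswith]
  · subst h
    simp only [List.concat_eq_append]
    rw [PySem.List.pyGet?_neg_one]
    have he : PySem.Chars.endswith (l' ++ [x]) [' '] = (x == ' ') := by
      by_cases hx : x = ' '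
      · subst hx
        simp only [beq_self_eq_true]
        rw [PySem.Chars.endswith_iff]
        exact List.suffix_append l' [' ']
      · have hns : ¬ ([' '] <:+ (l' ++ [x])) := by
          rw [List.suffix_concat_iff]
          rintro (h' | ⟨t, ht, -⟩)
          · simp at h'
          · have : x = ' ' := by
              rcases t with _ | ⟨y, t⟩ <;> simp at ht
              · exact ht.symm
            exact hx this
        have h1 : (x == ' ') = false := by simp [hx]
        have h2 : PySem.Chars.endswith (l' ++ [x]) [' '] = false := by
          rw [← Bool.not_eq_true, PySem.Chars.endswith_iff]; exact hns
        rw [h1, h2]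
    rw [he]
    simp

-- ===== VERDICT (by name: the statement is the Claim_ definition above) =====
theorem transform_to_normal_format_spec : Claim_equal_transform_to_normal_format := by
  intro t _
  unfold Spec_transform_to_normal_format transform_to_normal_format transform_to_normal_format_alt
  have h : ((PySem.List.enumerate (pvCompact t.toList)).foldl (pvAStep (pvCompact t.toList))
        (pvCompact t.toList, 0)).1
      = ((PySem.List.enumerate (pvCompact t.toList)).foldl (pvBStep (pvCompact t.toList))
        ([], false, false)).1 := by
    simpa [pvParity] using pvLoop_eq (pvCompact t.toList) (pvCompact t.toList) 0 [] (by simp)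
  simp only [h, funext pvPhase3_eq]
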